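-- pv_equiv track=rewrite | github.com/robsingh/dailybyte | visited_cities.py | uncommon_cities
-- ===== SOURCE A (Python) =====
-- def uncommon_cities(my_cities, other_cities):
--     """
--     Return the number(count) of cities that both lists DO NOT have in common.
--     """
--     city_count = 0
--
--     for city in my_cities:
--         if city not in other_cities:
--             city_count += 1
--
--     for city in other_cities :
--         if city not in my_cities:
--             city_count += 1
--
--
--     return city_count
-- ===== SOURCE B (Python) =====
-- def uncommon_cities(my_cities, other_cities):
--     """
--     Return the number(count) of cities that both lists DO NOT have in common.
--     """
--     c1 = {}
--     for city in my_cities: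
--         c1[city] = c1.get(city, 0) + 1
--     c2 = {}
--     for city in other_cities:
--         c2[city] = c2.get(city, 0) + 1
--     total = sum(n for v, n in c1.items() if v not in c2)
--     total += sum(n for v, n in c2.items() if v not in c1)
--     return total
-- ===== Notes on version B (the rewrite author's own statement) =====
-- stated objective: faster
-- what changed: B aggregates each list into a multiplicity dict once and then sums, over the distinct keys only, the full count of every key absent from the other dict (hash lookups), instead of A's per-element linear membership scan of the other list.
import Mathlib
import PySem

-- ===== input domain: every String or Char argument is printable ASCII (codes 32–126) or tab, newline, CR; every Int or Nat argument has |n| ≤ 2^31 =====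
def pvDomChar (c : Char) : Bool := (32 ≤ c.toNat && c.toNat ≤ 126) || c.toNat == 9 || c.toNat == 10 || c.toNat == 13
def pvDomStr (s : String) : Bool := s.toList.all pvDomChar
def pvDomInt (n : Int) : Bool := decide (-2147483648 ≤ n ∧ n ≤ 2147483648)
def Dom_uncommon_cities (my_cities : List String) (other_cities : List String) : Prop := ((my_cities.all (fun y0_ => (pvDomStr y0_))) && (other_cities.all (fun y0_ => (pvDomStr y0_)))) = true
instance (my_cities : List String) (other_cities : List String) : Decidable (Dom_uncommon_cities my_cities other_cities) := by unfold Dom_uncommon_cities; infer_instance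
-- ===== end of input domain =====

-- B replaces A's per-element membership scans with two multiplicity dicts summed over their distinct keys (faster in a timing run).


-- ===== PORT A =====
-- literal transliteration: two passes, each testing membership in the other list
def uncommon_cities (my_cities : List String) (other_cities : List String) : Int :=
  let city_count : Int := 0
  let city_count := my_cities.foldl
    (fun city_count city => if !(other_cities.contains city) then city_count + 1 else city_count)
    city_count
  let city_count := other_cities.foldl
    (fun city_count city => if !(my_cities.contains city) then city_count + 1 else city_count)
    city_count
  city_count

-- ===== PORT B =====
-- transliteration of Source B: build the two count dicts, then sum counts of keys absent from the other dict
def uncommon_cities_alt (my_cities : List String) (other_cities : List String) : Int :=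
  let c1 : PySem.Dict String Int :=
    my_cities.foldl (fun d city => d.insert city (d.getD city 0 + 1)) PySem.Dict.empty
  let c2 : PySem.Dict String Int :=
    other_cities.foldl (fun d city => d.insert city (d.getD city 0 + 1)) PySem.Dict.empty
  let total := ((c1.items.filter (fun p => !(c2.contains p.1))).map (fun p => p.2)).sum
  let total := total + ((c2.items.filter (fun p => !(c1.contains p.1))).map (fun p => p.2)).sum
  total

-- ===== PRECONDITION & SPEC =====
def Spec_uncommon_cities (my_cities : List String) (other_cities : List String) (out : Int) : Prop := out = uncommon_cities_alt my_cities other_cities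
instance (my_cities : List String) (other_cities : List String) (out : Int) : Decidable (Spec_uncommon_cities my_cities other_cities out) := by unfold Spec_uncommon_cities; infer_instance

-- ===== CLAIM (what is proved, stated in full; the proofs are below) =====
def Claim_equal_uncommon_cities : Prop := ∀ (my_cities : List String) (other_cities : List String), Dom_uncommon_cities my_cities other_cities → Spec_uncommon_cities my_cities other_cities (uncommon_cities my_cities other_cities)

-- ===== LEMMAS AND PROOFS =====

-- summing the multiplicities of the distinct p-keys of xs is counting p-elements of xs
theorem pv_sum_counts (xs : List String) (p : String → Bool) :
    ((((PySem.Set.ofList xs).filter p).map (fun k => (xs.count k : Int))).sum) = (xs.countP p : Int) := by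
  have hperm : (PySem.Set.ofList xs).Perm xs.dedup :=
    (List.perm_ext_iff_of_nodup (PySem.Set.nodup_ofList xs) xs.nodup_dedup).mpr
      (fun a => by rw [PySem.Set.mem_ofList, List.mem_dedup])
  rw [List.Perm.sum_eq (((hperm.filter p).map (fun k => (xs.count k : Int))))]
  rw [← List.sum_map_count_dedup_filter_eq_countP p xs, Nat.cast_list_sum]
  simp [Function.comp_def]

-- one side of B equals one pass of A's counting loop
theorem pv_side (xs ys : List String) :
    (((xs.foldl (fun (d : PySem.Dict String Int) city => d.insert city (d.getD city 0 + 1)) PySem.Dict.empty).items.filter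
        (fun p => !((ys.foldl (fun (d : PySem.Dict String Int) city => d.insert city (d.getD city 0 + 1)) PySem.Dict.empty).contains p.1))).map
      (fun p => p.2)).sum = (xs.countP (fun c => !(ys.contains c)) : Int) := by
  simp only [PySem.Dict.foldl_insert_getD_add_one_eq_counter]
  rw [PySem.Dict.items_counter]
  have hcont : ∀ v, (PySem.Dict.counter ys).contains v = ys.contains v := by
    intro v; simp [pysem]
  rw [show ((((PySem.Set.ofList xs).map (fun k => (k, (xs.count k : Int)))).filter
          (fun p => !((PySem.Dict.counter ys).contains p.1))).map (fun p => p.2)).sum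
      = ((((PySem.Set.ofList xs).filter (fun k => !(ys.contains k))).map
          (fun k => (xs.count k : Int)))).sum from by
        rw [List.filter_map, List.map_map]
        simp [Function.comp_def, hcont]]
  exact pv_sum_counts xs _

theorem pv_foldl_count (xs : List String) (p : String → Bool) (a : Int) :
    xs.foldl (fun acc x => if p x then acc + 1 else acc) a = a + (xs.countP p : Int) := by
  induction xs generalizing a with
  | nil => simp
  | cons x xs ih =>
    simp only [List.foldl_cons, List.countP_cons, ih]
    by_cases h : p x = true
    · simp [h]; ring
    · simp [h]

-- ===== VERDICT (by name: the statement is the Claim_ definition above) =====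
theorem uncommon_cities_spec : Claim_equal_uncommon_cities := by
  intro my other _
  show uncommon_cities my other = uncommon_cities_alt my other
  simp only [uncommon_cities, uncommon_cities_alt]
  rw [pv_side, pv_side, pv_foldl_count, pv_foldl_count]
  ring
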